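-- pv_equiv track=rewrite | github.com/pypi-data/pypi-mirror-99 | packages/binary-refinery/binary-refinery-0.3.28.tar.gz/binary-refinery-0.3.28/refinery/lib/tools.py | lookahead
-- ===== SOURCE A (Python) =====
-- def lookahead(iterator):
--     """
--     Implements a new iterator from a given one which returns elements
--     `(last, item)` where each `item` is taken from the original iterator
--     and `last` is a boolean indicating whether this is the last item.
--     """
--     last = False
--     it = iter(iterator)
--     try:
--         peek = next(it)
--     except StopIteration:
--         return
--     while not last:
--         item = peek
--         try:
--             peek = next(it)
--         except StopIteration:
--             last = True
--         yield last, item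
-- ===== SOURCE B (Python) =====
-- def lookahead(iterator):
--     items = list(iterator)
--     flags = [False] * (len(items) - 1) + [True]
--     yield from zip(flags, items)
-- ===== Notes on version B (the rewrite author's own statement) =====
-- stated objective: alternative
-- what changed: Replaces A's lazy one-ahead buffering (peek/last-flag while loop) by a two-stage batch computation: materialize the items, build a parallel flag vector [False]*(n-1)+[True], and zip it with the items.
import Mathlib
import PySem

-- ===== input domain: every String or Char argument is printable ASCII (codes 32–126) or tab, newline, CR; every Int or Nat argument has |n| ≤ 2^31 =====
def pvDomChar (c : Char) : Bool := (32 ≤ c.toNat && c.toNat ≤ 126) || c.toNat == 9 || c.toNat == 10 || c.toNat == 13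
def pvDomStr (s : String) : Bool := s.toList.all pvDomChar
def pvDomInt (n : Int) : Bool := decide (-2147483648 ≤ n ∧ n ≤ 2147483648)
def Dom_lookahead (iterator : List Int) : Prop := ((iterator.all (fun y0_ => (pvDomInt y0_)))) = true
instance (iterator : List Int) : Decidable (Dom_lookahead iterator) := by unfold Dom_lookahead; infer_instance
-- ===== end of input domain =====

-- B drops A's lazy one-ahead buffering: it materializes the items and zips them with a
-- flag vector [False]*(n-1)+[True]; equivalence is about the returned sequence of pairs
-- (B consumes its input eagerly where A streams).

-- ===== PORT A =====
-- A's while-loop: 'last' flag, 'peek' holds the next element; each round yields (last, item)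
-- where item is the old peek and last records whether advancing the iterator failed.
def lookaheadLoopA (last : Bool) (peek : Int) (it : List Int) : List (Bool × Int) :=
  if last then []
  else
    match it with
    | [] => [(true, peek)]                    -- next raised: last := True, yield (True, item), loop exits
    | y :: ys => (false, peek) :: lookaheadLoopA false y ys

def lookahead (iterator : List Int) : List (Bool × Int) :=
  match iterator with
  | [] => []                                  -- first next() raised: generator returns nothing
  | x :: xs => lookaheadLoopA false x xs

-- ===== PORT B =====
-- items = list(iterator); flags = [False]*(len(items)-1)+[True]; yield from zip(flags, items)
def lookahead_alt (iterator : List Int) : List (Bool × Int) :=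
  let items := iterator
  let flags := List.replicate (items.length - 1) false ++ [true]
  flags.zip items

-- ===== PRECONDITION & SPEC =====
def Spec_lookahead (iterator : List Int) (out : List (Bool × Int)) : Prop := out = lookahead_alt iterator
instance (iterator : List Int) (out : List (Bool × Int)) : Decidable (Spec_lookahead iterator out) := by unfold Spec_lookahead; infer_instance

-- ===== CLAIM (what is proved, stated in full; the proofs are below) =====
def Claim_equal_lookahead : Prop := ∀ (iterator : List Int), Dom_lookahead iterator → Spec_lookahead iterator (lookahead iterator)

-- ===== LEMMAS AND PROOFS =====
theorem lookahead_loop_eq_zip (xs : List Int) : ∀ (x : Int),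
    lookaheadLoopA false x xs = (List.replicate xs.length false ++ [true]).zip (x :: xs) := by
  induction xs with
  | nil => intro x; simp [lookaheadLoopA]
  | cons y ys ih =>
    intro x
    simp only [List.length_cons, List.replicate_succ, List.cons_append, List.zip_cons_cons]
    rw [← ih y]
    simp [lookaheadLoopA]

-- ===== VERDICT (by name: the statement is the Claim_ definition above) =====
theorem lookahead_spec : Claim_equal_lookahead := by
  intro iterator _
  unfold Spec_lookahead lookahead lookahead_alt
  cases iterator with
  | nil => rfl
  | cons x xs => simpa using lookahead_loop_eq_zip xs x
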